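-- pv_equiv track=rewrite | github.com/parkie0517/- | Gold5/5430_AC.py | compute
-- ===== SOURCE A (Python) =====
-- def compute(codes, int_code): # RDD, 4, 1234
--     pointer = True # True = Front, False = Rear
--     for code in codes: # R D D
--         if code == 'R':
--             if pointer: # if Front
--                 pointer = False
--             else:
--                 pointer = True
--         else:   # 만약 삭제 연산일 경우
--             if int_code: # 비어 있지 않을 경우
--                 if pointer: # 앞을 가리킬 경우
--                     int_code.pop(0)
--                 else:
--                     int_code.pop(-1)
--             else: # 비어 있는 경우
--                 return [], False
--     if int_code and pointer == False:
--         int_code.reverse()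
--     return int_code, True
-- ===== SOURCE B (Python) =====
-- def compute(codes, int_code):
--     # Faster: track window bounds and direction in O(1) per op, slice once at the end.
--     # Return-value equivalence only: A pops/reverses int_code in place, B leaves it untouched.
--     lo = 0
--     hi = len(int_code)
--     front = True
--     for c in codes:
--         if c == 'R':
--             front = not front
--         elif lo < hi:
--             if front:
--                 lo += 1
--             else:
--                 hi -= 1
--         else:
--             return [], False
--     res = int_code[lo:hi]
--     if not front:
--         res.reverse()
--     return res, True
-- ===== Notes on version B (the rewrite author's own statement) =====
-- stated objective: faster
-- what changed: Instead of mutating the list with pop(0)/pop(-1) per delete op, B keeps two window indices and a direction flag, updating them in O(1) per op, and takes one slice (reversed if needed) at the end.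
import Mathlib
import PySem

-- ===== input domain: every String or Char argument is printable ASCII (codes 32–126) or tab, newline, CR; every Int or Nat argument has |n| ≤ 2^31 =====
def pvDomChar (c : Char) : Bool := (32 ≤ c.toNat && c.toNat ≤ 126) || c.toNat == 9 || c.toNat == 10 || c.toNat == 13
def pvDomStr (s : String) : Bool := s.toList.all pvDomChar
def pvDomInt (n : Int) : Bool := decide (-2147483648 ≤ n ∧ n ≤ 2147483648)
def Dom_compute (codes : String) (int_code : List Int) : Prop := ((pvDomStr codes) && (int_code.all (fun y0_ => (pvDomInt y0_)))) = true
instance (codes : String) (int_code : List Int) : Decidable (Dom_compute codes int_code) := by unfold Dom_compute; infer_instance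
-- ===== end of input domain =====

-- B replaces A's per-op pop(0)/pop(-1) mutation by O(1) window-index updates and one final
-- slice (objective: faster). Return-value equivalence only: A mutates int_code in place, B does not.

-- ===== PORT A =====
-- the for-loop of A, with early return on delete-from-empty
def computeA : List Char → List Int → Bool → List Int × Bool
  | [], ic, pointer =>
      if ic ≠ [] ∧ pointer = false then (ic.reverse, true) else (ic, true)
  | c :: cs, ic, pointer =>
      if c = 'R' then
        computeA cs ic (if pointer then false else true)
      else
        if ic ≠ [] then
          if pointer then computeA cs ic.tail pointer      -- int_code.pop(0)
          else computeA cs ic.dropLast pointer             -- int_code.pop(-1)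
        else ([], false)

def compute (codes : String) (int_code : List Int) : List Int × Bool :=
  computeA codes.toList int_code true

-- ===== PORT B =====
-- the for-loop of B over window bounds lo/hi and direction flag; none = early `return [], False`
def computeBLoop : List Char → Int → Int → Bool → Option (Int × Int × Bool)
  | [], lo, hi, front => some (lo, hi, front)
  | c :: cs, lo, hi, front =>
      if c = 'R' then computeBLoop cs lo hi (!front)
      else if lo < hi then
        if front then computeBLoop cs (lo + 1) hi front
        else computeBLoop cs lo (hi - 1) front
      else none

def compute_alt (codes : String) (int_code : List Int) : List Int × Bool :=
  match computeBLoop codes.toList 0 (int_code.length : Int) true with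
  | none => ([], false)
  | some (lo, hi, front) =>
      let res := PySem.List.slice int_code (some lo) (some hi)   -- int_code[lo:hi]
      if front then (res, true) else (res.reverse, true)

-- ===== PRECONDITION & SPEC =====
def Spec_compute (codes : String) (int_code : List Int) (out : List Int × Bool) : Prop := out = compute_alt codes int_code
instance (codes : String) (int_code : List Int) (out : List Int × Bool) : Decidable (Spec_compute codes int_code out) := by unfold Spec_compute; infer_instance

-- ===== CLAIM (what is proved, stated in full; the proofs are below) =====
def Claim_equal_compute : Prop := ∀ (codes : String) (int_code : List Int), Dom_compute codes int_code → Spec_compute codes int_code (compute codes int_code)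

-- ===== LEMMAS AND PROOFS =====

-- interpret B's final loop state against the original list (drop/take form of the slice)
def finishB (ic : List Int) : Option (Int × Int × Bool) → List Int × Bool
  | none => ([], false)
  | some (a, b, f) =>
      let res := (ic.drop a.toNat).take (b.toNat - a.toNat)
      if f then (res, true) else (res.reverse, true)

theorem computeBLoop_bounds : ∀ (cs : List Char) (lo hi : Int) (f : Bool) (a b : Int) (g : Bool),
    computeBLoop cs lo hi f = some (a, b, g) → lo ≤ hi → lo ≤ a ∧ a ≤ b ∧ b ≤ hi := by
  intro cs
  induction cs with
  | nil =>
      intro lo hi f a b g h hle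
      simp [computeBLoop] at h
      obtain ⟨h1, h2, h3⟩ := h
      omega
  | cons c cs ih =>
      intro lo hi f a b g h hle
      simp only [computeBLoop] at h
      split_ifs at h with h1 h2 h3
      · exact ih lo hi (!f) a b g h hle
      · have := ih (lo + 1) hi f a b g h (by omega); omega
      · have := ih lo (hi - 1) f a b g h (by omega); omega

theorem computeBLoop_shift : ∀ (cs : List Char) (lo hi : Int) (f : Bool),
    computeBLoop cs (lo + 1) (hi + 1) f
      = (computeBLoop cs lo hi f).map (fun p => (p.1 + 1, p.2.1 + 1, p.2.2)) := by
  intro cs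
  induction cs with
  | nil => intro lo hi f; simp [computeBLoop]
  | cons c cs ih =>
      intro lo hi f
      simp only [computeBLoop]
      by_cases hR : c = 'R'
      · simp [hR, ih]
      · have hlt : (lo + 1 < hi + 1) ↔ (lo < hi) := by omega
        by_cases h : lo < hi
        · simp [hR, h, hlt.mpr h]
          by_cases hf : f
          · simpa [hf] using ih (lo + 1) hi f
          · simpa [hf] using ih lo (hi - 1) f
        · simp [hR, h, hlt]

-- finishB is unchanged by the shift when the state is shifted together with dropping the head
theorem finishB_tail (ic : List Int) (r : Option (Int × Int × Bool))
    (hb : ∀ a b g, r = some (a, b, g) → 0 ≤ a ∧ a ≤ b) :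
    finishB ic (r.map (fun p => (p.1 + 1, p.2.1 + 1, p.2.2))) = finishB ic.tail r := by
  cases r with
  | none => simp [finishB]
  | some p =>
      obtain ⟨a, b, g⟩ := p
      obtain ⟨ha, hab⟩ := hb a b g rfl
      simp only [Option.map_some, finishB]
      have h1 : (a + 1).toNat = a.toNat + 1 := by omega
      have h2 : (b + 1).toNat = b.toNat + 1 := by omega
      have h3 : ic.tail.drop a.toNat = ic.drop (a.toNat + 1) := by
        rw [← List.drop_one, List.drop_drop]; congr 1; omega
      have h4 : b.toNat + 1 - (a.toNat + 1) = b.toNat - a.toNat := by omega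
      rw [h1, h2, h4, ← h3]

-- finishB ignores the dropped last element when the window stays left of it
theorem finishB_dropLast (ic : List Int) (r : Option (Int × Int × Bool))
    (hb : ∀ a b g, r = some (a, b, g) → 0 ≤ a ∧ a ≤ b ∧ b ≤ (ic.length : Int) - 1) :
    finishB ic r = finishB ic.dropLast r := by
  cases r with
  | none => simp [finishB]
  | some p =>
      obtain ⟨a, b, g⟩ := p
      obtain ⟨ha, hab, hbl⟩ := hb a b g rfl
      simp only [finishB]
      have key : (ic.drop a.toNat).take (b.toNat - a.toNat)
          = (ic.dropLast.drop a.toNat).take (b.toNat - a.toNat) := by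
        rw [List.dropLast_eq_take, List.drop_take, List.take_take]
        congr 1
        omega
      rw [key]

theorem computeA_eq_finishB : ∀ (cs : List Char) (ic : List Int) (front : Bool),
    computeA cs ic front = finishB ic (computeBLoop cs 0 (ic.length : Int) front) := by
  intro cs
  induction cs with
  | nil =>
      intro ic front
      simp only [computeA, computeBLoop, finishB]
      have : (ic.drop (0 : Int).toNat).take (((ic.length : Int)).toNat - (0 : Int).toNat) = ic := by
        simp
      rw [this]
      cases front with
      | true => simp
      | false =>
          by_cases hic : ic = []
          · subst hic; simp
          · simp [hic]
  | cons c cs ih =>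
      intro ic front
      simp only [computeA, computeBLoop]
      by_cases hR : c = 'R'
      · rw [if_pos hR, if_pos hR, ih]
        cases front <;> simp
      · rw [if_neg hR, if_neg hR]
        by_cases hic : ic = []
        · subst hic
          simp [finishB]
        · have hlen : 0 < ic.length := List.length_pos_iff.mpr hic
          have hlt : (0 : Int) < (ic.length : Int) := by exact_mod_cast hlen
          rw [if_pos hic, if_pos hlt]
          cases front with
          | true =>
              simp only [reduceIte]
              rw [ih]
              have hsh : computeBLoop cs (0 + 1) ((ic.length : Int)) true
                  = (computeBLoop cs 0 ((ic.length : Int) - 1) true).map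
                      (fun p => (p.1 + 1, p.2.1 + 1, p.2.2)) := by
                have := computeBLoop_shift cs 0 ((ic.length : Int) - 1) true
                simpa using this
              have htl : (ic.tail.length : Int) = (ic.length : Int) - 1 := by
                rw [List.length_tail]; omega
              rw [hsh, htl]
              rw [finishB_tail ic _ ?_]
              intro a b g h
              have := computeBLoop_bounds cs 0 ((ic.length : Int) - 1) true a b g h (by omega)
              omega
          | false =>
              simp only [Bool.false_eq_true, if_false]
              rw [ih]
              have hdl : (ic.dropLast.length : Int) = (ic.length : Int) - 1 := by
                rw [List.length_dropLast]; omega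
              rw [hdl, ← finishB_dropLast ic _ ?_]
              intro a b g h
              have := computeBLoop_bounds cs 0 ((ic.length : Int) - 1) false a b g h (by omega)
              omega

-- ===== VERDICT (by name: the statement is the Claim_ definition above) =====
theorem compute_spec : Claim_equal_compute := by
  intro codes int_code _
  show compute codes int_code = compute_alt codes int_code
  rw [compute, compute_alt, computeA_eq_finishB]
  cases hB : computeBLoop codes.toList 0 (int_code.length : Int) true with
  | none => simp [finishB]
  | some p =>
      obtain ⟨a, b, g⟩ := p
      obtain ⟨ha, hab, hbl⟩ :=
        computeBLoop_bounds codes.toList 0 (int_code.length : Int) true a b g hB (by positivity)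
      simp only [finishB]
      rw [PySem.List.slice_toNat int_code ha (by omega)]
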